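-- pv_equiv track=rewrite | github.com/ydanilin/habroproxy2 | src/utils.py | multi_insert
-- ===== SOURCE A (Python) =====
-- from itertools import zip_longest, chain
--
-- def str_has_digits(stream):
--     """ to check if a word has digits inside """
--     return any(map(lambda x: x.isdigit(), stream))
--
-- def insert_if_needed(what, cond_len):
--     """
--         Returns function to be used in map()
--         Appends <what> to the end of a word if word length is <cond_len>
--     """
--     # pylint: disable=line-too-long
--     return lambda word: f'{word}{what}' if len(word) == cond_len and not str_has_digits(word) else word
--
-- def multi_insert(stri, what, cond_len, special):
--     """
--         Inserts <what> at the end of every word in the <stri> if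
--         the length of this word is <cond_len> characters.
--         Which symbols will be used as separators defined in <special> string.
--         Example is in test_utils.py
--     """
--     word = ''
--     words = []
--     separ = ''
--     separs = []
--     # peek into the string to set start state
--     state = 'inside' if stri[0] not in special else 'outside'
--     initial_state = state
--     for char in stri:
--         if state == 'inside':
--             if char not in special:
--                 word += char
--             else:
--                 separ += char
--                 words.append(word)
--                 word = ''
--                 state = 'outside'
--         elif state == 'outside':
--             if char in special:
--                 separ += char
--             else:
--                 word += char
--                 separs.append(separ)
--                 separ = ''
--                 state = 'inside'
--     # inclusion of last accumulator variable (word or separ) after cycle complete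
--     if state == 'inside':
--         words.append(word)
--     elif state == 'outside':
--         separs.append(separ)
--     # modification
--     modified_words = map(insert_if_needed(what, cond_len), words)
--     zip_back = (modified_words, separs) if initial_state == 'inside' else (separs, modified_words)
--     reconstructed = chain(*zip_longest(*zip_back, fillvalue=''))
--     return ''.join(reconstructed)
-- ===== SOURCE B (Python) =====
-- from itertools import groupby
--
-- def multi_insert(stri, what, cond_len, special):
--     pieces = []
--     for is_word, grp in groupby(stri, key=lambda c: c not in special):
--         run = ''.join(grp)
--         if is_word and len(run) == cond_len and not any(c.isdigit() for c in run):
--             run += what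
--         pieces.append(run)
--     return ''.join(pieces)
-- ===== Notes on version B (the rewrite author's own statement) =====
-- stated objective: simpler
-- what changed: Replaced A's two-accumulator word/separator state machine plus zip_longest/chain interleaving by a single groupby pass over maximal runs, modifying word runs in place so no reassembly is needed.
import Mathlib
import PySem

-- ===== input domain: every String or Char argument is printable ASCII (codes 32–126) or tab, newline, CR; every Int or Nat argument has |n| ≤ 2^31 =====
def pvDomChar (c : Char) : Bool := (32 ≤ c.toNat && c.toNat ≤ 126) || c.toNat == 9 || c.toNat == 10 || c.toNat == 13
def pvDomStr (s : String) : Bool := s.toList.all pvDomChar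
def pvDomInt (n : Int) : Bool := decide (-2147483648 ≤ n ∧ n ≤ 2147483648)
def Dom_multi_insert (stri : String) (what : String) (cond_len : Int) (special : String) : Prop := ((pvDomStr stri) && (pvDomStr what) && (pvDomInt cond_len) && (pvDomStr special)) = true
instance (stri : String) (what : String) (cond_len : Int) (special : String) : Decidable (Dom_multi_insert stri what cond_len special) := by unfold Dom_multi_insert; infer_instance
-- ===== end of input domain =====

-- B replaces A's two-accumulator state machine plus zip_longest/chain reassembly by one
-- groupby pass over maximal runs (objective: simpler). On stri = "" A raises IndexError
-- (excluded by Pre_); B returns "" there.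

-- ===== PORT A =====
-- helper insert_if_needed(what, cond_len) (str_has_digits inlined as `any`)
def pvInsertIfNeeded (what : List Char) (cond_len : Int) (word : List Char) : List Char :=
  if ((word.length : Int) == cond_len) && !(word.any PySem.Chars.isdigit) then word ++ what else word

-- one iteration of A's for-loop; state = (word, words, separ, separs, state=='inside')
def pvStepA (sp : List Char) (s : List Char × List (List Char) × List Char × List (List Char) × Bool)
    (c : Char) : List Char × List (List Char) × List Char × List (List Char) × Bool :=
  match s with
  | (word, words, separ, separs, st) =>
    if st then
      if !(sp.contains c) then (word ++ [c], words, separ, separs, true)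
      else ([], words ++ [word], separ ++ [c], separs, false)
    else
      if sp.contains c then (word, words, separ ++ [c], separs, false)
      else (word ++ [c], words, [], separs ++ [separ], true)

-- A's post-loop flush of the last accumulator
def pvFinalizeA (s : List Char × List (List Char) × List Char × List (List Char) × Bool) :
    List (List Char) × List (List Char) :=
  match s with
  | (word, words, separ, separs, st) =>
    if st then (words ++ [word], separs) else (words, separs ++ [separ])

-- chain(*zip_longest(xs, ys, fillvalue=''))
def pvInterleave : List (List Char) → List (List Char) → List Char
  | [], ys => ys.flatten
  | x :: xs, ys => x ++ pvInterleave ys xs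
termination_by xs ys => xs.length + ys.length

def multi_insert (stri : String) (what : String) (cond_len : Int) (special : String) : String :=
  let sp := special.toList
  match PySem.Str.pyGet? stri 0 with
  | none => ""   -- Python raises IndexError at stri[0]; these inputs are excluded by Pre_
  | some c0 =>
    let inside0 := !(sp.contains c0)
    let fin := pvFinalizeA (stri.toList.foldl (pvStepA sp) ([], [], [], [], inside0))
    let modified := fin.1.map (pvInsertIfNeeded what.toList cond_len)
    String.ofList (if inside0 then pvInterleave modified fin.2 else pvInterleave fin.2 modified)

-- ===== PORT B =====
-- groupby(stri, key=c not in special): the list of maximal same-class runs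
def pvRuns (sp : List Char) : List Char → List (List Char)
  | [] => []
  | c :: t =>
    (c :: t.takeWhile (fun d => (!(sp.contains d)) == (!(sp.contains c)))) ::
      pvRuns sp (t.dropWhile (fun d => (!(sp.contains d)) == (!(sp.contains c))))
termination_by l => l.length
decreasing_by
  exact Nat.lt_succ_of_le (List.length_dropWhile_le _ _)

-- B's loop body: append what to a word run of the right length with no digits
def pvModifyRun (sp what : List Char) (cond_len : Int) (run : List Char) : List Char :=
  match run with
  | [] => []
  | c :: _ =>
    if (!(sp.contains c)) && ((run.length : Int) == cond_len) && !(run.any PySem.Chars.isdigit)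
    then run ++ what else run

def multi_insert_alt (stri : String) (what : String) (cond_len : Int) (special : String) : String :=
  let sp := special.toList
  String.ofList (((pvRuns sp stri.toList).map (pvModifyRun sp what.toList cond_len)).flatten)

-- ===== PRECONDITION & SPEC =====
-- Pre_ excludes only stri = "", where A raises IndexError at the peek `stri[0]`.
def Pre_multi_insert (stri : String) (what : String) (cond_len : Int) (special : String) : Prop :=
  stri ≠ ""
instance (stri : String) (what : String) (cond_len : Int) (special : String) : Decidable (Pre_multi_insert stri what cond_len special) := by unfold Pre_multi_insert; infer_instance

def pvWitness_multi_insert : String × String × Int × String := ("net is up", "!", 3, " ")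

def Spec_multi_insert (stri : String) (what : String) (cond_len : Int) (special : String) (out : String) : Prop := out = multi_insert_alt stri what cond_len special
instance (stri : String) (what : String) (cond_len : Int) (special : String) (out : String) : Decidable (Spec_multi_insert stri what cond_len special out) := by unfold Spec_multi_insert; infer_instance

-- ===== CLAIM (what is proved, stated in full; the proofs are below) =====
def Claim_equal_multi_insert : Prop := ∀ (stri : String) (what : String) (cond_len : Int) (special : String), Dom_multi_insert stri what cond_len special → Pre_multi_insert stri what cond_len special → Spec_multi_insert stri what cond_len special (multi_insert stri what cond_len special)

-- ===== LEMMAS AND PROOFS =====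

-- even-index and odd-index elements of a list of runs
def pvEvens : List (List Char) → List (List Char)
  | [] => []
  | [x] => [x]
  | x :: _ :: xs => x :: pvEvens xs

def pvOdds (l : List (List Char)) : List (List Char) := pvEvens l.tail

lemma pvEvens_cons (x : List Char) (xs : List (List Char)) :
    pvEvens (x :: xs) = x :: pvOdds xs := by
  cases xs <;> rfl

lemma pvOdds_cons (x : List Char) (xs : List (List Char)) : pvOdds (x :: xs) = pvEvens xs := rfl

-- runs alternate between word class (k = true) and separator class, each run nonempty, homogeneous
def pvAlt (sp : List Char) : Bool → List (List Char) → Prop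
  | _, [] => True
  | k, r :: rs => r ≠ [] ∧ (∀ c ∈ r, (!(sp.contains c)) = k) ∧ pvAlt sp (!k) rs

lemma pvLoop_inside (sp : List Char) (ws : List Char) (h : ∀ c ∈ ws, sp.contains c = false) :
    ∀ (word : List Char) (words : List (List Char)) (separ : List Char) (separs : List (List Char)),
    ws.foldl (pvStepA sp) (word, words, separ, separs, true) = (word ++ ws, words, separ, separs, true) := by
  induction ws with
  | nil => intro word words separ separs; simp
  | cons c t ih =>
    intro word words separ separs
    have hc : c ∉ sp := by simpa using h c (by simp)
    have ht : ∀ x ∈ t, sp.contains x = false := fun x hx => h x (by simp [hx])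
    simp [List.foldl_cons, pvStepA, hc, ih ht]

lemma pvLoop_outside (sp : List Char) (ws : List Char) (h : ∀ c ∈ ws, sp.contains c = true) :
    ∀ (word : List Char) (words : List (List Char)) (separ : List Char) (separs : List (List Char)),
    ws.foldl (pvStepA sp) (word, words, separ, separs, false) = (word, words, separ ++ ws, separs, false) := by
  induction ws with
  | nil => intro word words separ separs; simp
  | cons c t ih =>
    intro word words separ separs
    have hc : c ∈ sp := by simpa using h c (by simp)
    have ht : ∀ x ∈ t, sp.contains x = true := fun x hx => h x (by simp [hx])
    simp [List.foldl_cons, pvStepA, hc, ih ht]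

lemma pvRuns_run (sp : List Char) (w l : List Char) (k : Bool) (hw : w ≠ [])
    (hk : ∀ x ∈ w, (!(sp.contains x)) = k) :
    pvRuns sp (w ++ l) =
      (w ++ l.takeWhile (fun d => (!(sp.contains d)) == k)) ::
        pvRuns sp (l.dropWhile (fun d => (!(sp.contains d)) == k)) := by
  cases w with
  | nil => exact absurd rfl hw
  | cons c w' =>
    have hc : (!(sp.contains c)) = k := hk c (by simp)
    have hw' : ∀ x ∈ w', (fun d => (!(sp.contains d)) == k) x = true := by
      intro x hx
      show ((!(sp.contains x)) == k) = true
      rw [hk x (by simp [hx])]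
      exact beq_self_eq_true k
    rw [List.cons_append, pvRuns, hc]
    rw [List.takeWhile_append_of_pos hw', List.dropWhile_append_of_pos hw']
    simp

lemma pvMain (sp : List Char) : ∀ (n : Nat) (l : List Char), l.length ≤ n →
    ∀ (word separ : List Char) (words separs : List (List Char)),
    (word ≠ [] → (∀ c ∈ word, sp.contains c = false) →
      pvFinalizeA (l.foldl (pvStepA sp) (word, words, [], separs, true)) =
        (words ++ pvEvens (pvRuns sp (word ++ l)), separs ++ pvOdds (pvRuns sp (word ++ l)))) ∧
    (separ ≠ [] → (∀ c ∈ separ, sp.contains c = true) →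
      pvFinalizeA (l.foldl (pvStepA sp) ([], words, separ, separs, false)) =
        (words ++ pvOdds (pvRuns sp (separ ++ l)), separs ++ pvEvens (pvRuns sp (separ ++ l)))) := by
  intro n
  induction n with
  | zero =>
    intro l hl word separ words separs
    have hnil : l = [] := List.length_eq_zero_iff.mp (Nat.le_zero.mp hl)
    subst hnil
    constructor
    · intro hw hcl
      rw [pvRuns_run sp word [] true hw (fun x hx => by rw [hcl x hx]; rfl)]
      simp [pvFinalizeA, pvRuns, pvEvens, pvOdds]
    · intro hs hcl
      rw [pvRuns_run sp separ [] false hs (fun x hx => by rw [hcl x hx]; rfl)]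
      simp [pvFinalizeA, pvRuns, pvEvens, pvOdds]
  | succ n ih =>
    intro l hl word separ words separs
    constructor
    · intro hw hcl
      have hsplit : l.takeWhile (fun d => (!(sp.contains d)) == true) ++
          l.dropWhile (fun d => (!(sp.contains d)) == true) = l := List.takeWhile_append_dropWhile
      have htake : ∀ c ∈ l.takeWhile (fun d => (!(sp.contains d)) == true), sp.contains c = false := by
        intro c hc
        have := List.mem_takeWhile_imp hc
        simpa using this
      have hruns := pvRuns_run sp word l true hw (fun x hx => by rw [hcl x hx]; rfl)
      have hfold : l.foldl (pvStepA sp) (word, words, [], separs, true) =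
          (l.dropWhile (fun d => (!(sp.contains d)) == true)).foldl (pvStepA sp)
            (word ++ l.takeWhile (fun d => (!(sp.contains d)) == true), words, [], separs, true) := by
        conv_lhs => rw [← hsplit]
        rw [List.foldl_append, pvLoop_inside sp _ htake]
      rw [hfold]
      cases hdrop : l.dropWhile (fun d => (!(sp.contains d)) == true) with
      | nil =>
        rw [hruns, hdrop]
        simp [pvFinalizeA, pvRuns, pvEvens, pvOdds]
      | cons d t =>
        have hd : sp.contains d = true := by
          have := List.head?_dropWhile_not (fun d => (!(sp.contains d)) == true) l
          rw [hdrop] at this; simpa using this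
        have htlen : t.length ≤ n := by
          have h1 : (l.dropWhile (fun d => (!(sp.contains d)) == true)).length ≤ l.length :=
            List.length_dropWhile_le _ _
          rw [hdrop] at h1; simp at h1; omega
        have hout := (ih t htlen (word ++ l.takeWhile (fun d => (!(sp.contains d)) == true)) [d]
          (words ++ [word ++ l.takeWhile (fun d => (!(sp.contains d)) == true)]) separs).2
          (by simp) (by intro x hx; simp at hx; rw [hx, hd])
        rw [List.foldl_cons]
        have hstep : pvStepA sp (word ++ l.takeWhile (fun d => (!(sp.contains d)) == true),
            words, [], separs, true) d =
            ([], words ++ [word ++ l.takeWhile (fun d => (!(sp.contains d)) == true)], [d], separs, false) := by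
          have hd' : d ∈ sp := by simpa using hd
          simp [pvStepA, hd']
        rw [hstep, hout, hruns, hdrop]
        simp [pvEvens_cons, pvOdds_cons]
    · intro hs hcl
      have hsplit : l.takeWhile (fun d => (!(sp.contains d)) == false) ++
          l.dropWhile (fun d => (!(sp.contains d)) == false) = l := List.takeWhile_append_dropWhile
      have htake : ∀ c ∈ l.takeWhile (fun d => (!(sp.contains d)) == false), sp.contains c = true := by
        intro c hc
        have := List.mem_takeWhile_imp hc
        simpa using this
      have hruns := pvRuns_run sp separ l false hs (fun x hx => by rw [hcl x hx]; rfl)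
      have hfold : l.foldl (pvStepA sp) ([], words, separ, separs, false) =
          (l.dropWhile (fun d => (!(sp.contains d)) == false)).foldl (pvStepA sp)
            ([], words, separ ++ l.takeWhile (fun d => (!(sp.contains d)) == false), separs, false) := by
        conv_lhs => rw [← hsplit]
        rw [List.foldl_append, pvLoop_outside sp _ htake]
      rw [hfold]
      cases hdrop : l.dropWhile (fun d => (!(sp.contains d)) == false) with
      | nil =>
        rw [hruns, hdrop]
        simp [pvFinalizeA, pvRuns, pvEvens, pvOdds]
      | cons d t =>
        have hd : sp.contains d = false := by
          have := List.head?_dropWhile_not (fun d => (!(sp.contains d)) == false) l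
          rw [hdrop] at this; simpa using this
        have htlen : t.length ≤ n := by
          have h1 : (l.dropWhile (fun d => (!(sp.contains d)) == false)).length ≤ l.length :=
            List.length_dropWhile_le _ _
          rw [hdrop] at h1; simp at h1; omega
        have hin := (ih t htlen [d] (separ ++ l.takeWhile (fun d => (!(sp.contains d)) == false))
          words (separs ++ [separ ++ l.takeWhile (fun d => (!(sp.contains d)) == false)])).1
          (by simp) (by intro x hx; simp at hx; rw [hx, hd])
        rw [List.foldl_cons]
        have hstep : pvStepA sp ([], words,
            separ ++ l.takeWhile (fun d => (!(sp.contains d)) == false), separs, false) d =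
            ([d], words, [], separs ++ [separ ++ l.takeWhile (fun d => (!(sp.contains d)) == false)], true) := by
          have hd' : d ∉ sp := by simpa using hd
          simp [pvStepA, hd']
        rw [hstep, hin, hruns, hdrop]
        simp [pvEvens_cons, pvOdds_cons]

lemma pvRuns_alt (sp : List Char) : ∀ (n : Nat) (l : List Char), l.length ≤ n →
    ∀ c t, l = c :: t → pvAlt sp (!(sp.contains c)) (pvRuns sp l) := by
  intro n
  induction n with
  | zero => intro l hl c t hct; subst hct; simp at hl
  | succ n ih =>
    intro l hl c t hct
    subst hct
    rw [pvRuns]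
    refine ⟨by simp, ?_, ?_⟩
    · intro x hx
      rcases List.mem_cons.mp hx with h | h
      · subst h; rfl
      · have := List.mem_takeWhile_imp h
        simpa using this
    · cases hdrop : t.dropWhile (fun d => (!(sp.contains d)) == (!(sp.contains c))) with
      | nil => rw [pvRuns]; trivial
      | cons d t' =>
        have hd : (!(sp.contains d)) = !(!(sp.contains c)) := by
          have := List.head?_dropWhile_not (fun d => (!(sp.contains d)) == (!(sp.contains c))) t
          rw [hdrop] at this
          simp at this
          cases hsc : sp.contains c <;> cases hsd : sp.contains d <;> simp_all
        have hlen : (d :: t').length ≤ n := by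
          have h1 := List.length_dropWhile_le (fun d => (!(sp.contains d)) == (!(sp.contains c))) t
          rw [hdrop] at h1; simp at h1; simp at hl; simpa using Nat.le_trans h1 (by omega)
        have := ih (d :: t') hlen d t' rfl
        rw [hd] at this
        exact this

lemma pvInter (sp what : List Char) (cond_len : Int) : ∀ rs : List (List Char),
    (pvAlt sp true rs →
      pvInterleave ((pvEvens rs).map (pvInsertIfNeeded what cond_len)) (pvOdds rs) =
        (rs.map (pvModifyRun sp what cond_len)).flatten) ∧
    (pvAlt sp false rs →
      pvInterleave (pvEvens rs) ((pvOdds rs).map (pvInsertIfNeeded what cond_len)) =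
        (rs.map (pvModifyRun sp what cond_len)).flatten) := by
  intro rs
  induction rs with
  | nil => exact ⟨fun _ => by simp [pvEvens, pvOdds, pvInterleave], fun _ => by simp [pvEvens, pvOdds, pvInterleave]⟩
  | cons r rs ih =>
    constructor
    · rintro ⟨hne, hhom, halt⟩
      cases r with
      | nil => exact absurd rfl hne
      | cons c rt =>
        have hc : sp.contains c = false := by have := hhom c (by simp); simpa using this
        rw [pvEvens_cons, pvOdds_cons, List.map_cons, pvInterleave]
        have halt' : pvAlt sp false rs := by simpa using halt
        rw [ih.2 halt']
        simp [pvModifyRun, pvInsertIfNeeded, show c ∉ sp by simpa using hc]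
    · rintro ⟨hne, hhom, halt⟩
      cases r with
      | nil => exact absurd rfl hne
      | cons c rt =>
        have hc : sp.contains c = true := by have := hhom c (by simp); simpa using this
        rw [pvEvens_cons, pvOdds_cons, pvInterleave]
        have halt' : pvAlt sp true rs := by simpa using halt
        rw [ih.1 halt']
        simp [pvModifyRun, show c ∈ sp by simpa using hc]

-- ===== VERDICT (by name: the statement is the Claim_ definition above) =====
theorem multi_insert_spec : Claim_equal_multi_insert := by
  intro stri what cond_len special _hdom hpre
  unfold Spec_multi_insert
  have hl : stri.toList ≠ [] := by
    intro hh; exact hpre (by rwa [String.toList_eq_nil_iff] at hh)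
  obtain ⟨c, t, hct⟩ : ∃ c t, stri.toList = c :: t := by
    cases h : stri.toList with
    | nil => exact absurd h hl
    | cons c t => exact ⟨c, t, rfl⟩
  have hget : PySem.Str.pyGet? stri 0 = some c := by
    simp [PySem.Str.pyGet?, PySem.Chars.pyGet?, PySem.List.pyGet?, PySem.List.pyIdx?, hct]
  unfold multi_insert multi_insert_alt
  rw [hget]
  cases hc : (special.toList).contains c with
  | false =>
    have hmain := (pvMain special.toList t.length t le_rfl [c] [] [] []).1
      (by simp) (by intro x hx; simp at hx; subst hx; exact hc)
    have halt : pvAlt special.toList true (pvRuns special.toList (c :: t)) := by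
      have := pvRuns_alt special.toList (c :: t).length (c :: t) le_rfl c t rfl
      rwa [show (!(special.toList.contains c)) = true by rw [hc]; rfl] at this
    simp only [hct, hc, List.foldl_cons]
    have hstep : pvStepA special.toList ([], [], [], [], !false) c = ([c], [], [], [], true) := by
      simp [pvStepA, show c ∉ special.toList by simpa using hc]
    rw [hstep]
    have h1 : (pvFinalizeA (List.foldl (pvStepA special.toList) ([c], [], [], [], true) t)).1
        = pvEvens (pvRuns special.toList (c :: t)) := by rw [hmain]; simp
    have h2 : (pvFinalizeA (List.foldl (pvStepA special.toList) ([c], [], [], [], true) t)).2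
        = pvOdds (pvRuns special.toList (c :: t)) := by rw [hmain]; simp
    rw [h1, h2, if_pos (show (!false) = true from rfl)]
    rw [(pvInter special.toList what.toList cond_len (pvRuns special.toList (c :: t))).1 halt]
  | true =>
    have hmain := (pvMain special.toList t.length t le_rfl [] [c] [] []).2
      (by simp) (by intro x hx; simp at hx; subst hx; exact hc)
    have halt : pvAlt special.toList false (pvRuns special.toList (c :: t)) := by
      have := pvRuns_alt special.toList (c :: t).length (c :: t) le_rfl c t rfl
      rwa [show (!(special.toList.contains c)) = false by rw [hc]; rfl] at this
    simp only [hct, hc, List.foldl_cons]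
    have hstep : pvStepA special.toList ([], [], [], [], !true) c = ([], [], [c], [], false) := by
      simp [pvStepA, show c ∈ special.toList by simpa using hc]
    rw [hstep]
    have h1 : (pvFinalizeA (List.foldl (pvStepA special.toList) ([], [], [c], [], false) t)).1
        = pvOdds (pvRuns special.toList (c :: t)) := by rw [hmain]; simp
    have h2 : (pvFinalizeA (List.foldl (pvStepA special.toList) ([], [], [c], [], false) t)).2
        = pvEvens (pvRuns special.toList (c :: t)) := by rw [hmain]; simp
    rw [h1, h2, if_neg (show ¬ ((!true) = true) by decide)]
    rw [(pvInter special.toList what.toList cond_len (pvRuns special.toList (c :: t))).2 halt]
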